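-- pv_equiv track=rewrite | github.com/heliumman/AdventOfCode | 2020/python/day6B.py | group_intersection
-- ===== SOURCE A (Python) =====
-- def group_intersection(groups):
--     total = 0
--     for group in groups:
--         group_set = set(list(group[0]))
--         for i in group:
--             group_set = group_set.intersection(set(list(i)))
--
--         group_count = len(group_set)
--
--         total = total + group_count
--
--     return total
-- ===== SOURCE B (Python) =====
-- def group_intersection(groups):
--     total = 0
--     for group in groups:
--         n = len(group)
--         counts = {}
--         for person in group:
--             for c in set(person):
--                 counts[c] = counts.get(c, 0) + 1
--         for v in counts.values():
--             if v == n: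
--                 total += 1
--     return total
-- ===== Notes on version B (the rewrite author's own statement) =====
-- stated objective: alternative
-- what changed: Per group, instead of repeatedly intersecting sets, B builds one character-count table (each character counted once per person) and counts the characters whose count equals the group size.
import Mathlib
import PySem

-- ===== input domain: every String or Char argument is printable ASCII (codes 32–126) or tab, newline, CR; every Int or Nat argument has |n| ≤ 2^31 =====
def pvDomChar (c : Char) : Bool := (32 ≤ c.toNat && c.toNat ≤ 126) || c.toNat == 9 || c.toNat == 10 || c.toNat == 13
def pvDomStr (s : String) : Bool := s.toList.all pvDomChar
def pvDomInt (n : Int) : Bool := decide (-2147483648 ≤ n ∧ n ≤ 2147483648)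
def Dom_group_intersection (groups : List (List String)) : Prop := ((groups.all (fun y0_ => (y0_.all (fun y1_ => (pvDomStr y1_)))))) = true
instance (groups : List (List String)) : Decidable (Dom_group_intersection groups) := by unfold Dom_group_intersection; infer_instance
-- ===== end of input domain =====

-- B replaces A's repeated per-group set intersections by a single per-group character-count
-- table (each character counted once per person) thresholded at the group size; same cost,
-- different algorithm.  Pre_ excludes inputs containing an empty group, where A raises IndexError.


-- ===== PORT A =====
-- total = 0; for group in groups: group_set = set(list(group[0])); for i in group:
--   group_set = group_set.intersection(set(list(i))); total += len(group_set)
-- group[0] is PySem.List.pyGet?; the .getD "" arm is unreachable under Pre_ (nonempty groups).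
def group_intersection (groups : List (List String)) : Int :=
  groups.foldl (fun total group =>
    let group_set0 := PySem.Set.ofList ((PySem.List.pyGet? group 0).getD "").toList
    let group_set := group.foldl (fun s i => PySem.Set.inter s (PySem.Set.ofList i.toList)) group_set0
    let group_count := PySem.Set.len group_set
    total + group_count) 0

-- ===== PORT B =====
-- n = len(group); counts = {}; for person in group: for c in set(person): counts[c] = counts.get(c,0)+1
-- then for v in counts.values(): if v == n: total += 1
def group_intersection_alt (groups : List (List String)) : Int :=
  groups.foldl (fun total group =>
    let n := group.length
    let counts := group.foldl (fun d person =>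
      (PySem.Set.ofList person.toList).foldl (fun d c => d.insert c (d.getD c 0 + 1)) d)
      PySem.Dict.empty
    counts.values.foldl (fun t v => if v == (n : Int) then t + 1 else t) total) 0

-- ===== PRECONDITION & SPEC =====
-- Pre_ excludes exactly the inputs on which A raises IndexError (a groups list containing an
-- empty group, so group[0] fails); B's counting pass would simply contribute 0 for such a group.
def Pre_group_intersection (groups : List (List String)) : Prop := ∀ g ∈ groups, g ≠ []
instance (groups : List (List String)) : Decidable (Pre_group_intersection groups) := by unfold Pre_group_intersection; infer_instance
def pvWitness_group_intersection : List (List String) := [["ab", "b"], ["c"]]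

def Spec_group_intersection (groups : List (List String)) (out : Int) : Prop := out = group_intersection_alt groups
instance (groups : List (List String)) (out : Int) : Decidable (Spec_group_intersection groups out) := by unfold Spec_group_intersection; infer_instance

-- ===== CLAIM (what is proved, stated in full; the proofs are below) =====
def Claim_equal_group_intersection : Prop := ∀ (groups : List (List String)), Dom_group_intersection groups → Pre_group_intersection groups → Spec_group_intersection groups (group_intersection groups)

-- ===== LEMMAS AND PROOFS =====

-- A's inner loop: repeated intersection is one filter
lemma inter_foldl (group : List String) (s : List Char) :
    group.foldl (fun s i => PySem.Set.inter s (PySem.Set.ofList i.toList)) s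
      = s.filter (fun c => group.all (fun p => decide (c ∈ p.toList))) := by
  induction group generalizing s with
  | nil => simp
  | cons p rest ih =>
      rw [List.foldl_cons, ih]
      show (List.filter _ (PySem.Set.inter s _)) = _
      simp only [PySem.Set.inter, List.filter_filter]
      apply List.filter_congr
      intro c _
      simp [Bool.and_comm]

-- B's count table: the value at c is the number of persons containing c
lemma cnt_getD (group : List String) (d : PySem.Dict Char Int) (c : Char) :
    (group.foldl (fun d person =>
        (PySem.Set.ofList person.toList).foldl (fun d c => d.insert c (d.getD c 0 + 1)) d) d).getD c 0
      = d.getD c 0 + (group.countP (fun p => decide (c ∈ p.toList)) : Int) := by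
  induction group generalizing d with
  | nil => simp
  | cons p rest ih =>
      rw [List.foldl_cons, ih, PySem.Dict.getD_foldl_insert_add_one, List.countP_cons]
      by_cases h : c ∈ p.toList
      · rw [List.count_eq_one_of_mem (PySem.Set.nodup_ofList _) ((PySem.Set.mem_ofList _ _).mpr h)]
        simp [h]
        ring
      · rw [List.count_eq_zero_of_not_mem (fun hc => h ((PySem.Set.mem_ofList _ _).mp hc))]
        simp [h]

-- B's count table: key membership
lemma cnt_keys_mem (group : List String) (d : PySem.Dict Char Int) (c : Char) :
    c ∈ (group.foldl (fun d person =>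
        (PySem.Set.ofList person.toList).foldl (fun d c => d.insert c (d.getD c 0 + 1)) d) d).keys
      ↔ c ∈ d.keys ∨ ∃ p ∈ group, c ∈ p.toList := by
  induction group generalizing d with
  | nil => simp
  | cons p rest ih =>
      rw [List.foldl_cons, ih, PySem.Dict.keys_foldl_insert, PySem.Set.mem_update]
      simp [PySem.Set.mem_ofList, or_assoc]

-- B's count table: keys stay Nodup
lemma cnt_keys_nodup (group : List String) (d : PySem.Dict Char Int) (h : d.keys.Nodup) :
    (group.foldl (fun d person =>
        (PySem.Set.ofList person.toList).foldl (fun d c => d.insert c (d.getD c 0 + 1)) d) d).keys.Nodup := by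
  induction group generalizing d with
  | nil => exact h
  | cons p rest ih =>
      exact ih _ (PySem.Dict.nodup_keys_foldl_insert _ _ _ h)

-- two Nodup lists agreeing in membership wherever p holds have equal countP p
lemma countP_eq_of_nodup {l1 l2 : List Char} (p : Char → Bool) (h1 : l1.Nodup) (h2 : l2.Nodup)
    (h : ∀ c, p c = true → (c ∈ l1 ↔ c ∈ l2)) : l1.countP p = l2.countP p := by
  rw [List.countP_eq_length_filter, List.countP_eq_length_filter]
  refine List.Perm.length_eq ?_
  refine (List.perm_ext_iff_of_nodup (h1.filter p) (h2.filter p)).mpr ?_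
  intro c
  simp only [List.mem_filter]
  constructor
  · rintro ⟨hm, hp⟩; exact ⟨(h c hp).mp hm, hp⟩
  · rintro ⟨hm, hp⟩; exact ⟨(h c hp).mpr hm, hp⟩

-- the per-group equality
lemma group_eq (group : List String) (hne : group ≠ []) :
    PySem.Set.len (group.foldl (fun s i => PySem.Set.inter s (PySem.Set.ofList i.toList))
        (PySem.Set.ofList ((PySem.List.pyGet? group 0).getD "").toList))
      = ((group.foldl (fun d person =>
            (PySem.Set.ofList person.toList).foldl (fun d c => d.insert c (d.getD c 0 + 1)) d)
            (PySem.Dict.empty : PySem.Dict Char Int)).values.count ((group.length : Int)) : Int) := by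
  obtain ⟨p0, rest, rfl⟩ := List.exists_cons_of_ne_nil hne
  have hget : (PySem.List.pyGet? (p0 :: rest) 0).getD "" = p0 := by
    simp [PySem.List.pyGet?, PySem.List.pyIdx?]
  rw [hget, inter_foldl]
  have hnd : ((p0 :: rest).foldl (fun d person =>
      (PySem.Set.ofList person.toList).foldl (fun d c => d.insert c (d.getD c 0 + 1)) d)
      (PySem.Dict.empty : PySem.Dict Char Int)).keys.Nodup :=
    cnt_keys_nodup _ _ (by simp)
  rw [PySem.Dict.values_eq_map_keys _ hnd 0, List.count_eq_countP, List.countP_map]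
  have hpred : ∀ c : Char,
      ((fun a => a == (((p0 :: rest).length : Nat) : Int)) ∘ fun k =>
        ((p0 :: rest).foldl (fun d person =>
          (PySem.Set.ofList person.toList).foldl (fun d c => d.insert c (d.getD c 0 + 1)) d)
          (PySem.Dict.empty : PySem.Dict Char Int)).getD k 0) c
        = (p0 :: rest).all (fun p => decide (c ∈ p.toList)) := by
    intro c
    simp only [Function.comp_apply, cnt_getD, PySem.Dict.getD_empty, zero_add]
    rw [Bool.eq_iff_iff]
    simp only [beq_iff_eq, List.all_eq_true, decide_eq_true_eq]
    constructor
    · intro h p hp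
      have h' : (p0 :: rest).countP (fun p => decide (c ∈ p.toList)) = (p0 :: rest).length := by
        exact_mod_cast h
      simpa using List.countP_eq_length.mp h' p hp
    · intro h
      have h' := List.countP_eq_length.mpr
        (fun p hp => by simpa using h p hp :
          ∀ p ∈ (p0 :: rest), (fun p => decide (c ∈ p.toList)) p = true)
      exact_mod_cast h'
  have hstep : List.countP ((fun a => a == (((p0 :: rest).length : Nat) : Int)) ∘ fun k =>
        ((p0 :: rest).foldl (fun d person =>
          (PySem.Set.ofList person.toList).foldl (fun d c => d.insert c (d.getD c 0 + 1)) d)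
          (PySem.Dict.empty : PySem.Dict Char Int)).getD k 0)
        ((p0 :: rest).foldl (fun d person =>
          (PySem.Set.ofList person.toList).foldl (fun d c => d.insert c (d.getD c 0 + 1)) d)
          (PySem.Dict.empty : PySem.Dict Char Int)).keys
      = List.countP (fun c => (p0 :: rest).all (fun p => decide (c ∈ p.toList)))
        ((p0 :: rest).foldl (fun d person =>
          (PySem.Set.ofList person.toList).foldl (fun d c => d.insert c (d.getD c 0 + 1)) d)
          (PySem.Dict.empty : PySem.Dict Char Int)).keys := by
    apply List.countP_congr
    intro c _
    rw [hpred c]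
  rw [hstep]
  have hmem : ∀ c : Char, ((p0 :: rest).all (fun p => decide (c ∈ p.toList))) = true →
      (c ∈ ((p0 :: rest).foldl (fun d person =>
        (PySem.Set.ofList person.toList).foldl (fun d c => d.insert c (d.getD c 0 + 1)) d)
        (PySem.Dict.empty : PySem.Dict Char Int)).keys ↔ c ∈ PySem.Set.ofList p0.toList) := by
    intro c hp
    simp only [List.all_eq_true, decide_eq_true_eq] at hp
    rw [cnt_keys_mem, PySem.Set.mem_ofList]
    constructor
    · intro _; exact hp p0 (by simp)
    · intro hc; exact Or.inr ⟨p0, by simp, hc⟩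
  rw [countP_eq_of_nodup _ hnd (PySem.Set.nodup_ofList p0.toList) hmem]
  simp [PySem.Set.len, List.countP_eq_length_filter]

-- ===== VERDICT (by name: the statement is the Claim_ definition above) =====
theorem group_intersection_spec : Claim_equal_group_intersection := by
  intro groups _ hpre
  show group_intersection groups = group_intersection_alt groups
  unfold group_intersection group_intersection_alt
  apply PySem.List.foldl_congr_mem
  intro acc group hg
  have hne := hpre group hg
  dsimp only
  rw [PySem.List.foldl_beq_add_one, group_eq group hne]
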